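-- pv_equiv track=rewrite | github.com/kill9command/PandaAGI | apps/services/gateway/utils/text.py | clean_subject
-- ===== SOURCE A (Python) =====
-- LEADING_STOPWORDS = (
--     "is",
--     "are",
--     "was",
--     "were",
--     "the",
--     "a",
--     "an",
--     "my",
--     "your",
--     "our",
--     "favorite",
-- )
--
-- def clean_subject(value: str) -> str:
--     """Clean subject string by removing leading stopwords."""
--     result = (value or "").strip()
--     while True:
--         lower = result.lower()
--         matched = False
--         for stop in LEADING_STOPWORDS:
--             prefix = stop + " "
--             if lower.startswith(prefix):
--                 result = result[len(prefix):].lstrip()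
--                 matched = True
--                 break
--         if not matched:
--             break
--     return result.strip()
-- ===== SOURCE B (Python) =====
-- LEADING_STOPWORDS = (
--     "is",
--     "are",
--     "was",
--     "were",
--     "the",
--     "a",
--     "an",
--     "my",
--     "your",
--     "our",
--     "favorite",
-- )
--
-- _STOPSET = frozenset(LEADING_STOPWORDS)
--
--
-- def clean_subject(value: str) -> str:
--     """Clean subject string by removing leading stopwords.
--
--     Tokenize once on literal spaces, advance an index past the leading
--     run of stopword tokens (and the whitespace-only tokens a removal
--     exposes), then rejoin the tail once.
--     """
--     tokens = (value or "").strip().split(" ")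
--     i = 0
--     while i < len(tokens) - 1:
--         t = tokens[i].lstrip()
--         if t != "" and t.lower() not in _STOPSET:
--             break
--         i += 1
--     return " ".join(tokens[i:]).strip()
-- ===== Notes on version B (the rewrite author's own statement) =====
-- stated objective: alternative
-- what changed: B tokenizes the stripped string once with a single str.split on the space separator, advances an index over the token list past the leading stopword and whitespace-only tokens, and rejoins the tail once, instead of A's repeated startswith-scan, slice and lstrip on the string itself.
import Mathlib
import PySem

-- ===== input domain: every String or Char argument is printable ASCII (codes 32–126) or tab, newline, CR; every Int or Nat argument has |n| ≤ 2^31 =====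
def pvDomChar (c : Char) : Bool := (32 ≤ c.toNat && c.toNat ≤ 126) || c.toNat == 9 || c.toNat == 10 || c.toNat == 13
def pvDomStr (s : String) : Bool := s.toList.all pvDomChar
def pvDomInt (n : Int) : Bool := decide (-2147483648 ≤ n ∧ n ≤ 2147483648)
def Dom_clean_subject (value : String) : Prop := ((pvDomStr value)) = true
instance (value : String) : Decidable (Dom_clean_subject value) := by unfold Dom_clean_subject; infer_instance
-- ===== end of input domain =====

-- B tokenizes the stripped string once on literal spaces, advances past the leading
-- stopword / whitespace-only tokens of the token list, and rejoins the tail once, instead of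
-- A's repeated startswith-scan, slice and lstrip on the string itself (alternative decomposition).

-- The module constant LEADING_STOPWORDS (shared by both Pythons)
def pvStopsList : List (List Char) :=
  ["is".toList, "are".toList, "was".toList, "were".toList, "the".toList, "a".toList,
   "an".toList, "my".toList, "your".toList, "our".toList, "favorite".toList]

-- ===== PORT A =====
-- the inner `for stop in LEADING_STOPWORDS: … break`: first stopword whose `stop + " "` prefixes `lower`
def pvFirstStop (lower : List Char) : List (List Char) → Option (List Char)
  | [] => none
  | stop :: rest =>
      if PySem.Chars.startswith lower (stop ++ [' ']) then some stop
      else pvFirstStop lower rest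

-- needed by pvLoopA's termination proof
theorem pvFirstStop_some_mem_prefix (low stop : List Char) :
    ∀ L : List (List Char), pvFirstStop low L = some stop →
      stop ∈ L ∧ (stop ++ [' ']) <+: low := by
  intro L
  induction L with
  | nil => intro h; simp [pvFirstStop] at h
  | cons a rest ih =>
      intro h
      by_cases hp : PySem.Chars.startswith low (a ++ [' ']) = true
      · simp [pvFirstStop, hp] at h
        subst h
        refine ⟨List.mem_cons_self, ?_⟩
        simpa [PySem.Chars.startswith, List.isPrefixOf_iff_prefix] using hp
      · simp [pvFirstStop, hp] at h
        obtain ⟨h1, h2⟩ := ih h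
        exact ⟨List.mem_cons_of_mem _ h1, h2⟩

-- the `while True:` loop of A
def pvLoopA (result : List Char) : List Char :=
  match h : pvFirstStop (PySem.Chars.lower result) pvStopsList with
  | some stop => pvLoopA (PySem.Chars.lstrip (result.drop (stop.length + 1)))
  | none => result
termination_by result.length
decreasing_by
  have hp := (pvFirstStop_some_mem_prefix _ _ _ h).2
  have hlen : stop.length + 1 ≤ result.length := by
    have := hp.length_le
    simpa [PySem.Chars.lower] using this
  have h1 : (PySem.Chars.lstrip (result.drop (stop.length + 1))).length ≤
      (result.drop (stop.length + 1)).length := List.length_dropWhile_le _ _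
  have h2 : (result.drop (stop.length + 1)).length = result.length - (stop.length + 1) :=
    List.length_drop
  omega

def clean_subject (value : String) : String :=
  String.ofList (PySem.Chars.strip (pvLoopA (PySem.Chars.strip value.toList)))

-- ===== PORT B =====
-- the frozenset _STOPSET
def pvStopSet : PySem.Set (List Char) := PySem.Set.ofList pvStopsList

-- the `while i < len(tokens) - 1: …` index loop, as the obvious structural recursion on the
-- token-list suffix `tokens[i:]` (the loop body never looks left of i; the loop exit / `break`
-- returns the current suffix tokens[i:])
def pvAdvance : List (List Char) → List (List Char)
  | tok :: rest@(_ :: _) =>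
      let t := PySem.Chars.lstrip tok
      if t ≠ [] && !(PySem.Set.contains pvStopSet (PySem.Chars.lower t)) then tok :: rest
      else pvAdvance rest
  | ts => ts

def clean_subject_alt (value : String) : String :=
  String.ofList (PySem.Chars.strip (PySem.Chars.join [' ']
    (pvAdvance (PySem.Chars.splitOn (PySem.Chars.strip value.toList) [' ']))))

-- ===== PRECONDITION & SPEC =====
def Spec_clean_subject (value : String) (out : String) : Prop := out = clean_subject_alt value
instance (value : String) (out : String) : Decidable (Spec_clean_subject value out) := by unfold Spec_clean_subject; infer_instance

-- ===== CLAIM (what is proved, stated in full; the proofs are below) =====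
def Claim_equal_clean_subject : Prop := ∀ (value : String), Dom_clean_subject value → Spec_clean_subject value (clean_subject value)

-- ===== LEMMAS AND PROOFS =====

-- reference recursive form of str.split(" ")
def pvSplitSp : List Char → List (List Char)
  | [] => [[]]
  | c :: rest =>
      if c = ' ' then [] :: pvSplitSp rest
      else
        match pvSplitSp rest with
        | t :: ts => (c :: t) :: ts
        | [] => [[c]]

theorem pvSplitSp_ne_nil (s : List Char) : pvSplitSp s ≠ [] := by
  cases s with
  | nil => simp [pvSplitSp]
  | cons c rest =>
      by_cases h : c = ' '
      · simp [pvSplitSp, h]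
      · simp only [pvSplitSp, h, if_false]
        cases hr : pvSplitSp rest <;> simp

theorem pv_modifyHead_id (l : List (List Char)) : l.modifyHead (fun x => x) = l := by
  cases l <;> rfl

theorem pvSplitOn_go_eq :
    ∀ (fuel : ℕ) (l cur : List Char) (acc : List (List Char)), l.length ≤ fuel →
      PySem.Chars.splitOn.go [' '] fuel l cur acc =
        acc.reverse ++ (pvSplitSp l).modifyHead (cur.reverse ++ ·) := by
  intro fuel
  induction fuel with
  | zero =>
      intro l cur acc h
      have hl : l = [] := by
        cases l with
        | nil => rfl
        | cons c r => simp at h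
      subst hl
      simp [PySem.Chars.splitOn.go, pvSplitSp]
  | succ n ih =>
      intro l cur acc h
      cases l with
      | nil => simp [PySem.Chars.splitOn.go, pvSplitSp]
      | cons c rest =>
          by_cases hc : c = ' '
          · subst hc
            have hpre : ([' '] : List Char).isPrefixOf (' ' :: rest) = true := by
              simp [List.isPrefixOf]
            rw [PySem.Chars.splitOn.go]
            simp only [hpre, if_true, List.length_cons, List.drop_succ_cons,
              List.length_nil, List.drop_zero]
            rw [ih rest [] (List.reverse cur :: acc) (by simpa using h)]
            simp [pvSplitSp, pv_modifyHead_id]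
          · have hpre : ([' '] : List Char).isPrefixOf (c :: rest) = false := by
              simp [List.isPrefixOf]
              exact fun he => hc he.symm
            rw [PySem.Chars.splitOn.go]
            simp only [hpre, Bool.false_eq_true, if_false]
            rw [ih rest (c :: cur) acc (by simpa using h)]
            obtain ⟨t, ts, hts⟩ : ∃ t ts, pvSplitSp rest = t :: ts := by
              cases hr : pvSplitSp rest with
              | nil => exact absurd hr (pvSplitSp_ne_nil rest)
              | cons t ts => exact ⟨t, ts, rfl⟩
            simp [pvSplitSp, hc, hts]

theorem pvSplitOn_eq (s : List Char) : PySem.Chars.splitOn s [' '] = pvSplitSp s := by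
  unfold PySem.Chars.splitOn
  rw [pvSplitOn_go_eq (s.length + 1) s [] [] (by omega)]
  simp only [List.reverse_nil, List.nil_append]
  exact pv_modifyHead_id _

theorem pvJoin_cons_of_ne (t : List Char) (ts : List (List Char)) (h : ts ≠ []) :
    PySem.Chars.join [' '] (t :: ts) = t ++ ' ' :: PySem.Chars.join [' '] ts := by
  cases ts with
  | nil => exact absurd rfl h
  | cons u us =>
      rw [PySem.Chars.join_cons_cons]
      simp

theorem pvJoin_splitSp (s : List Char) : PySem.Chars.join [' '] (pvSplitSp s) = s := by
  induction s with
  | nil => simp [pvSplitSp, PySem.Chars.join_singleton]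
  | cons c rest ih =>
      by_cases hc : c = ' '
      · subst hc
        simp only [pvSplitSp, if_true]
        rw [pvJoin_cons_of_ne _ _ (pvSplitSp_ne_nil rest)]
        simp [ih]
      · simp only [pvSplitSp, hc, if_false]
        obtain ⟨t, ts, hts⟩ : ∃ t ts, pvSplitSp rest = t :: ts := by
          cases hr : pvSplitSp rest with
          | nil => exact absurd hr (pvSplitSp_ne_nil rest)
          | cons t ts => exact ⟨t, ts, rfl⟩
        rw [hts]
        cases ts with
        | nil =>
            rw [PySem.Chars.join_singleton]
            rw [hts, PySem.Chars.join_singleton] at ih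
            simp [ih]
        | cons u us =>
            rw [PySem.Chars.join_cons_cons]
            rw [hts, PySem.Chars.join_cons_cons] at ih
            simp only [List.cons_append, List.append_assoc] at ih ⊢
            rw [ih]

theorem pvSplitSp_no_space (s : List Char) : ∀ t ∈ pvSplitSp s, ' ' ∉ t := by
  induction s with
  | nil => simp [pvSplitSp]
  | cons c rest ih =>
      by_cases hc : c = ' '
      · subst hc
        simp only [pvSplitSp, if_true]
        intro t ht
        rcases List.mem_cons.mp ht with rfl | ht'
        · simp
        · exact ih t ht'
      · simp only [pvSplitSp, hc, if_false]
        obtain ⟨t0, ts, hts⟩ : ∃ t0 ts, pvSplitSp rest = t0 :: ts := by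
          cases hr : pvSplitSp rest with
          | nil => exact absurd hr (pvSplitSp_ne_nil rest)
          | cons t0 ts => exact ⟨t0, ts, rfl⟩
        rw [hts]
        intro t ht
        rcases List.mem_cons.mp ht with rfl | ht'
        · intro hm
          rcases List.mem_cons.mp hm with he | hm'
          · exact hc he.symm
          · exact ih t0 (hts ▸ List.mem_cons_self) hm'
        · exact ih t (hts ▸ List.mem_cons_of_mem _ ht')

theorem pv_lowerChar_space (c : Char) (h : PySem.Chars.lowerChar c = ' ') : c = ' ' := by
  unfold PySem.Chars.lowerChar at h
  split at h
  · rename_i hu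
    simp only [PySem.Chars.isupper, Bool.and_eq_true, decide_eq_true_eq] at hu
    have h65 : 65 ≤ c.toNat ∧ c.toNat ≤ 90 := by
      obtain ⟨h1, h2⟩ := hu
      rw [Char.le_def, UInt32.le_iff_toNat_le] at h1 h2
      exact ⟨h1, h2⟩
    have hv : Nat.isValidChar (c.toNat + 32) := by left; omega
    have := congrArg Char.toNat h
    rw [Char.toNat_ofNat] at this
    simp [hv] at this
    omega
  · exact h

theorem pv_stops_no_space : ∀ stop ∈ pvStopsList, ' ' ∉ stop := by decide

theorem pv_space_notin_lower (l : List Char) (h : ' ' ∉ l) : ' ' ∉ PySem.Chars.lower l := by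
  intro hm
  simp only [PySem.Chars.lower, List.mem_map] at hm
  obtain ⟨c, hc, hlc⟩ := hm
  exact h (pv_lowerChar_space c hlc ▸ hc)

theorem pvFirstStop_none_iff (low : List Char) :
    ∀ L : List (List Char), pvFirstStop low L = none ↔
      ∀ stop ∈ L, ¬ (stop ++ [' ']) <+: low := by
  intro L
  induction L with
  | nil => simp [pvFirstStop]
  | cons a rest ih =>
      cases hp : PySem.Chars.startswith low (a ++ [' ']) with
      | true =>
          simp only [pvFirstStop, hp, if_true]
          constructor
          · intro h; cases h
          · intro h
            exact absurd (by simpa [PySem.Chars.startswith, List.isPrefixOf_iff_prefix] using hp)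
              (h a List.mem_cons_self)
      | false =>
          simp only [pvFirstStop, hp, Bool.false_eq_true, if_false]
          rw [ih]
          constructor
          · intro h stop hs
            rcases List.mem_cons.mp hs with rfl | hs'
            · intro hc
              have hsw : PySem.Chars.startswith low (stop ++ [' ']) = true := by
                simpa [PySem.Chars.startswith, List.isPrefixOf_iff_prefix] using hc
              rw [hp] at hsw; cases hsw
            · exact h stop hs'
          · intro h stop hs
            exact h stop (List.mem_cons_of_mem _ hs)

theorem pv_contains_iff (x : List Char) :
    PySem.Set.contains pvStopSet x = true ↔ x ∈ pvStopsList := by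
  unfold pvStopSet PySem.Set.contains
  rw [List.contains_iff_mem]
  exact PySem.Set.mem_ofList _ _

theorem pv_no_match_of_no_space (x : List Char) (h : ' ' ∉ x) :
    pvFirstStop x pvStopsList = none := by
  rw [pvFirstStop_none_iff]
  intro stop _ hpre
  exact h (hpre.subset (by simp))

-- the first space splits a list uniquely
theorem pv_takeWhile_middle (p : Char → Bool) (xs : List Char) (y : Char) (ys : List Char)
    (hxs : ∀ x ∈ xs, p x = true) (hy : p y = false) :
    (xs ++ y :: ys).takeWhile p = xs := by
  induction xs with
  | nil => simp [hy]
  | cons a t ih =>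
      have ha : p a = true := hxs a (List.mem_cons_self)
      simp only [List.cons_append, List.takeWhile_cons, ha, if_true]
      rw [ih (fun x hx => hxs x (List.mem_cons_of_mem _ hx))]

-- a stopword prefix of `lower l ++ ' ' :: b` (l space-free) is exactly `lower l`
theorem pv_match_unique (l b stop : List Char) (hl : ' ' ∉ PySem.Chars.lower l)
    (hstop : ' ' ∉ stop)
    (hpre : (stop ++ [' ']) <+: PySem.Chars.lower l ++ ' ' :: b) :
    stop = PySem.Chars.lower l := by
  obtain ⟨u, hu⟩ := hpre
  have hu' : stop ++ ' ' :: u = PySem.Chars.lower l ++ ' ' :: b := by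
    simpa using hu
  have h1 : (stop ++ ' ' :: u).takeWhile (fun c => c ≠ ' ') = stop :=
    pv_takeWhile_middle _ _ _ _
      (fun x hx => by
        simp only [ne_eq, decide_eq_true_eq]
        intro he
        exact hstop (he ▸ hx)) (by simp)
  have h2 : (PySem.Chars.lower l ++ ' ' :: b).takeWhile (fun c => c ≠ ' ') =
      PySem.Chars.lower l :=
    pv_takeWhile_middle _ _ _ _
      (fun x hx => by
        simp only [ne_eq, decide_eq_true_eq]
        intro he
        exact hl (he ▸ hx)) (by simp)
  rw [← h1, hu', h2]

-- unfolding lemmas for A's well-founded loop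
theorem pvLoopA_some (s stop : List Char)
    (h : pvFirstStop (PySem.Chars.lower s) pvStopsList = some stop) :
    pvLoopA s = pvLoopA (PySem.Chars.lstrip (s.drop (stop.length + 1))) := by
  rw [pvLoopA]
  split
  · rename_i stop' heq
    rw [h] at heq
    injection heq with heq
    rw [heq]
  · rename_i heq
    rw [h] at heq
    simp at heq

theorem pvLoopA_none (s : List Char)
    (h : pvFirstStop (PySem.Chars.lower s) pvStopsList = none) :
    pvLoopA s = s := by
  rw [pvLoopA]
  split
  · rename_i stop' heq
    rw [h] at heq
    simp at heq
  · rfl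

theorem pv_drop_middle (xs : List Char) (y : Char) (ys : List Char) :
    (xs ++ y :: ys).drop (xs.length + 1) = ys := by
  have h : xs ++ y :: ys = (xs ++ [y]) ++ ys := by simp
  rw [h, show xs.length + 1 = (xs ++ [y]).length by simp, List.drop_left]

-- lstrip / strip plumbing
theorem pv_lstrip_append_ws (a b : List Char) (h : PySem.Chars.lstrip a = []) :
    PySem.Chars.lstrip (a ++ b) = PySem.Chars.lstrip b := by
  unfold PySem.Chars.lstrip at *
  rw [List.dropWhile_append, h]
  simp

theorem pv_lstrip_append_of_ne (a b : List Char) (h : PySem.Chars.lstrip a ≠ []) :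
    PySem.Chars.lstrip (a ++ b) = PySem.Chars.lstrip a ++ b := by
  unfold PySem.Chars.lstrip at *
  rw [List.dropWhile_append]
  simp only [List.isEmpty_iff]
  rw [if_neg h]

theorem pv_lstrip_idem (s : List Char) :
    PySem.Chars.lstrip (PySem.Chars.lstrip s) = PySem.Chars.lstrip s := by
  unfold PySem.Chars.lstrip
  induction s with
  | nil => simp
  | cons c rest ih =>
      by_cases hc : PySem.Chars.isspace c = true
      · simp [hc, ih]
      · simp [hc]

theorem pv_strip_lstrip (s : List Char) :
    PySem.Chars.strip (PySem.Chars.lstrip s) = PySem.Chars.strip s := by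
  unfold PySem.Chars.strip
  rw [pv_lstrip_idem]

theorem pv_lstrip_strip (s : List Char) :
    PySem.Chars.lstrip (PySem.Chars.strip s) = PySem.Chars.strip s := by
  unfold PySem.Chars.strip
  set x := PySem.Chars.lstrip s with hx
  have hxx : PySem.Chars.lstrip x = x := pv_lstrip_idem s
  have hpre : PySem.Chars.rstrip x <+: x := by
    unfold PySem.Chars.rstrip
    have hsuf : List.dropWhile PySem.Chars.isspace x.reverse <:+ x.reverse :=
      List.dropWhile_suffix _
    exact (List.reverse_suffix
      (l₁ := (List.dropWhile PySem.Chars.isspace x.reverse).reverse) (l₂ := x)).mp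
      (by simpa using hsuf)
  cases hr : PySem.Chars.rstrip x with
  | nil => rfl
  | cons h0 t0 =>
      obtain ⟨w, hw⟩ := hpre
      rw [hr] at hw
      have hph0 : PySem.Chars.isspace h0 = false := by
        by_contra hp
        have hp' : PySem.Chars.isspace h0 = true := by
          cases hb : PySem.Chars.isspace h0 with
          | true => rfl
          | false => exact absurd hb hp
        have hxeq : x = h0 :: (t0 ++ w) := by simpa using hw.symm
        have : PySem.Chars.lstrip x = PySem.Chars.lstrip (t0 ++ w) := by
          rw [hxeq]
          unfold PySem.Chars.lstrip
          simp [hp']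
        rw [hxx, hxeq] at this
        have hle : (PySem.Chars.lstrip (t0 ++ w)).length ≤ (t0 ++ w).length :=
          List.length_dropWhile_le _ _
        rw [← this] at hle
        simp at hle
      unfold PySem.Chars.lstrip
      simp [hph0]

theorem pv_strip_eq_of_lstrip (t z : List Char) :
    PySem.Chars.strip (PySem.Chars.lstrip t ++ z) = PySem.Chars.strip (t ++ z) := by
  by_cases h : PySem.Chars.lstrip t = []
  · rw [h]
    simp only [List.nil_append]
    rw [← pv_strip_lstrip (t ++ z), pv_lstrip_append_ws t z h, pv_strip_lstrip]
  · unfold PySem.Chars.strip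
    rw [pv_lstrip_append_of_ne t z h]
    congr 1
    rw [pv_lstrip_append_of_ne _ z (by rw [pv_lstrip_idem]; exact h), pv_lstrip_idem]

theorem pv_space_notin_lstrip (t : List Char) (h : ' ' ∉ t) : ' ' ∉ PySem.Chars.lstrip t :=
  fun hm => h ((List.dropWhile_sublist _).mem hm)

-- the central invariant: A's loop on the joined suffix equals B's token scan
theorem pv_inv : ∀ ts : List (List Char), (∀ t ∈ ts, ' ' ∉ t) →
    PySem.Chars.strip (pvLoopA (PySem.Chars.lstrip (PySem.Chars.join [' '] ts))) =
    PySem.Chars.strip (PySem.Chars.join [' '] (pvAdvance ts)) := by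
  intro ts
  induction ts with
  | nil =>
      intro _
      simp only [PySem.Chars.join_nil, pvAdvance]
      rw [show PySem.Chars.lstrip [] = [] from rfl,
        pvLoopA_none [] (by decide)]
  | cons t rest ih =>
      intro htok
      cases rest with
      | nil =>
          simp only [PySem.Chars.join_singleton, pvAdvance]
          have hns : ' ' ∉ PySem.Chars.lower (PySem.Chars.lstrip t) :=
            pv_space_notin_lower _ (pv_space_notin_lstrip t (htok t List.mem_cons_self))
          rw [pvLoopA_none _ (pv_no_match_of_no_space _ hns), pv_strip_lstrip]
      | cons r rs =>
          have hJ : PySem.Chars.join [' '] (t :: r :: rs) =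
              t ++ ' ' :: PySem.Chars.join [' '] (r :: rs) :=
            pvJoin_cons_of_ne _ _ (by simp)
          have htokr : ∀ u ∈ r :: rs, ' ' ∉ u := fun u hu => htok u (List.mem_cons_of_mem _ hu)
          have htns : ' ' ∉ t := htok t List.mem_cons_self
          set Jr := PySem.Chars.join [' '] (r :: rs) with hJr
          set l := PySem.Chars.lstrip t with hldef
          by_cases hl : l = []
          · -- whitespace-only token: both sides skip it
            have hls : PySem.Chars.lstrip (t ++ ' ' :: Jr) = PySem.Chars.lstrip Jr := by
              rw [pv_lstrip_append_ws t _ (by rw [← hldef]; exact hl)]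
              unfold PySem.Chars.lstrip
              rw [List.dropWhile_cons]
              simp [show PySem.Chars.isspace ' ' = true from rfl]
            have hadv : pvAdvance (t :: r :: rs) = pvAdvance (r :: rs) := by
              simp [pvAdvance, ← hldef, hl]
            rw [hJ, hls, hadv]
            exact ih htokr
          · have hlns : ' ' ∉ l := pv_space_notin_lstrip t htns
            have hlowns : ' ' ∉ PySem.Chars.lower l := pv_space_notin_lower _ hlns
            have hls : PySem.Chars.lstrip (t ++ ' ' :: Jr) = l ++ ' ' :: Jr := by
              rw [pv_lstrip_append_of_ne t _ (by rw [← hldef]; exact hl)]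
            have hlower : PySem.Chars.lower (l ++ ' ' :: Jr) =
                PySem.Chars.lower l ++ ' ' :: PySem.Chars.lower Jr := by
              simp [PySem.Chars.lower, show PySem.Chars.lowerChar ' ' = ' ' from rfl]
            by_cases hmem : PySem.Chars.lower l ∈ pvStopsList
            · -- stopword token: A removes `stop + " "` and lstrips; B skips the token
              obtain ⟨stop, hfs⟩ : ∃ stop,
                  pvFirstStop (PySem.Chars.lower (l ++ ' ' :: Jr)) pvStopsList = some stop := by
                cases hfs : pvFirstStop (PySem.Chars.lower (l ++ ' ' :: Jr)) pvStopsList with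
                | none =>
                    exfalso
                    have := (pvFirstStop_none_iff _ _).mp hfs _ hmem
                    apply this
                    rw [hlower]
                    exact ⟨PySem.Chars.lower Jr, by simp⟩
                | some stop => exact ⟨stop, rfl⟩
              obtain ⟨hsmem, hspre⟩ := pvFirstStop_some_mem_prefix _ _ _ hfs
              rw [hlower] at hspre
              have hseq : stop = PySem.Chars.lower l :=
                pv_match_unique l _ stop hlowns (pv_stops_no_space stop hsmem) hspre
              have hslen : stop.length = l.length := by
                rw [hseq]; simp [PySem.Chars.lower]
              have hdrop : (l ++ ' ' :: Jr).drop (stop.length + 1) = Jr := by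
                rw [hslen]
                exact pv_drop_middle l ' ' Jr
              have hadv : pvAdvance (t :: r :: rs) = pvAdvance (r :: rs) := by
                have : PySem.Set.contains pvStopSet (PySem.Chars.lower l) = true :=
                  (pv_contains_iff _).mpr hmem
                simp [pvAdvance, ← hldef]
                exact fun _ hns => absurd ((PySem.Set.mem_ofList _ _).mpr hmem) hns
              rw [hJ, hls, pvLoopA_some _ _ hfs, hdrop, hadv]
              exact ih htokr
            · -- ordinary token: both loops stop here
              have hfs : pvFirstStop (PySem.Chars.lower (l ++ ' ' :: Jr)) pvStopsList = none := by
                rw [pvFirstStop_none_iff]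
                intro stop hs hpre
                rw [hlower] at hpre
                exact hmem (pv_match_unique l _ stop hlowns (pv_stops_no_space stop hs) hpre ▸ hs)
              have hadv : pvAdvance (t :: r :: rs) = t :: r :: rs := by
                simp [pvAdvance, ← hldef, hl]
                exact fun hmem' => absurd ((PySem.Set.mem_ofList _ _).mp hmem') hmem
              rw [hJ, hls, pvLoopA_none _ hfs, hadv, hJ]
              exact pv_strip_eq_of_lstrip t (' ' :: Jr)

-- ===== VERDICT (by name: the statement is the Claim_ definition above) =====
theorem clean_subject_spec : Claim_equal_clean_subject := by
  intro value _
  unfold Spec_clean_subject clean_subject clean_subject_alt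
  rw [pvSplitOn_eq]
  congr 1
  have h1 := pv_inv (pvSplitSp (PySem.Chars.strip value.toList))
    (pvSplitSp_no_space _)
  rw [pvJoin_splitSp, pv_lstrip_strip] at h1
  exact h1
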